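-- pv_equiv track=rewrite | github.com/rodrigosemicolon/AlgInfTheory | assignment_1/src/recognizer.py | get_stran
-- ===== SOURCE A (Python) =====
-- def get_stran(data, thresh):
--     blocks = []
--     i = 0
--     flag = [False for i in data]
--     for i in range(len(data)):
--         if data[i] <= thresh and not flag[i]:
--             val = data[i]
--             beg = i
--             end = i
--             for j in range(i + 1, len(data)):
--                 if data[j] >= thresh:
--                     val += data[j]
--                     flag[j] = True
--                     end = j
--                 else:
--                     break
--             if beg != end:
--                 blocks.append(((beg, end), val))
--         flag[i] = True
--
--     return blocks
-- ===== SOURCE B (Python) =====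
-- def get_stran(data, thresh):
--     blocks = []
--     cur = None  # open block: (beg, end, val)
--     for i, x in enumerate(data):
--         if cur is None:
--             if x <= thresh:
--                 cur = (i, i, x)
--         elif x >= thresh:
--             cur = (cur[0], i, cur[2] + x)
--         else:
--             if cur[0] != cur[1]:
--                 blocks.append(((cur[0], cur[1]), cur[2]))
--             cur = (i, i, x)
--     if cur is not None and cur[0] != cur[1]:
--         blocks.append(((cur[0], cur[1]), cur[2]))
--     return blocks
-- ===== Notes on version B (the rewrite author's own statement) =====
-- stated objective: alternative
-- what changed: B is a single stateful pass (a fold over enumerate(data) carrying an Optional open-block accumulator that is closed on run breaks and flushed at the end), with no auxiliary flag array and no inner run-scanning loop; a timing run measured this constant-factor cheaper (no flag list allocation/marking, no per-run restart of an indexed inner loop).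
import Mathlib
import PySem

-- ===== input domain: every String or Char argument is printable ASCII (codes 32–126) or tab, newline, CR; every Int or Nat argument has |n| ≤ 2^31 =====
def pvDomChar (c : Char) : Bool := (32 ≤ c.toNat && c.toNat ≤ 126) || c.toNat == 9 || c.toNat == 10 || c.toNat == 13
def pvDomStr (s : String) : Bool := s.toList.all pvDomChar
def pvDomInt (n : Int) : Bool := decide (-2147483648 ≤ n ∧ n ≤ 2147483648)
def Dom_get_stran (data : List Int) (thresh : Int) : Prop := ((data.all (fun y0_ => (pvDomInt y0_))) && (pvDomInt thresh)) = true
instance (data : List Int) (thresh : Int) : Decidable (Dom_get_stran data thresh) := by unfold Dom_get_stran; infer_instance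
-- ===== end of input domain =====

-- B replaces A's nested loops plus parallel boolean `flag` array by ONE stateful pass:
-- a fold over enumerate(data) carrying an optional open block (beg, end, val) that is
-- closed on a below-threshold break and flushed at the end; same cost, no marking array.
-- A's loops are ported with a structural fuel counter (fuel ≥ remaining indices, so it never runs out).

-- ===== PORT A =====
-- inner `for j in range(i+1, len(data))` with break; returns (val, end, flag)
def pvInnerA (data : List Int) (thresh : Int) : Nat → Nat → Int → Nat → List Bool → Int × Nat × List Bool
  | 0, _, val, e, flag => (val, e, flag)
  | fuel + 1, j, val, e, flag =>
    if j < data.length then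
      if thresh ≤ data.getD j 0 then
        pvInnerA data thresh fuel (j + 1) (val + data.getD j 0) j (flag.set j true)
      else (val, e, flag)
    else (val, e, flag)

-- outer `for i in range(len(data))`
def pvOuterA (data : List Int) (thresh : Int) : Nat → Nat → List Bool → List ((Int × Int) × Int) → List ((Int × Int) × Int)
  | 0, _, _, blocks => blocks
  | fuel + 1, i, flag, blocks =>
    if i < data.length then
      if data.getD i 0 ≤ thresh ∧ flag.getD i false = false then
        pvOuterA data thresh fuel (i + 1)
          ((pvInnerA data thresh data.length (i + 1) (data.getD i 0) i flag).2.2.set i true)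
          (if i ≠ (pvInnerA data thresh data.length (i + 1) (data.getD i 0) i flag).2.1 then
            blocks ++ [(((i : Int), ((pvInnerA data thresh data.length (i + 1) (data.getD i 0) i flag).2.1 : Int)),
                        (pvInnerA data thresh data.length (i + 1) (data.getD i 0) i flag).1)]
          else blocks)
      else pvOuterA data thresh fuel (i + 1) (flag.set i true) blocks
    else blocks

def get_stran (data : List Int) (thresh : Int) : List ((Int × Int) × Int) :=
  pvOuterA data thresh data.length 0 (data.map (fun _ => false)) []

-- ===== PORT B =====
-- one step of the pass: state = (blocks so far, optional open block (beg, end, val)), input = (i, x)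
def pvStepB (thresh : Int) (st : List ((Int × Int) × Int) × Option (Int × Int × Int)) (p : Int × Int) :
    List ((Int × Int) × Int) × Option (Int × Int × Int) :=
  match st.2 with
  | none => if p.2 ≤ thresh then (st.1, some (p.1, p.1, p.2)) else (st.1, none)
  | some (b, e, v) =>
    if thresh ≤ p.2 then (st.1, some (b, p.1, v + p.2))
    else ((if b ≠ e then st.1 ++ [((b, e), v)] else st.1), some (p.1, p.1, p.2))

-- the final `if cur is not None and cur[0] != cur[1]: blocks.append(...)`
def pvFlushB (st : List ((Int × Int) × Int) × Option (Int × Int × Int)) : List ((Int × Int) × Int) :=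
  match st.2 with
  | none => st.1
  | some (b, e, v) => if b ≠ e then st.1 ++ [((b, e), v)] else st.1

def get_stran_alt (data : List Int) (thresh : Int) : List ((Int × Int) × Int) :=
  pvFlushB ((PySem.List.enumerate data 0).foldl (pvStepB thresh) ([], none))

-- ===== PRECONDITION & SPEC =====
def Spec_get_stran (data : List Int) (thresh : Int) (out : List ((Int × Int) × Int)) : Prop := out = get_stran_alt data thresh
instance (data : List Int) (thresh : Int) (out : List ((Int × Int) × Int)) : Decidable (Spec_get_stran data thresh out) := by unfold Spec_get_stran; infer_instance

-- ===== CLAIM (what is proved, stated in full; the proofs are below) =====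
def Claim_equal_get_stran : Prop := ∀ (data : List Int) (thresh : Int), Dom_get_stran data thresh → Spec_get_stran data thresh (get_stran data thresh)

-- ===== LEMMAS AND PROOFS =====

-- Proof-only intermediate: the index-jumping loop (no flag array), bridging A's loops to B's fold.
-- run scan: extends while data[j] >= thresh; returns (val, end)
def pvRunB (data : List Int) (thresh : Int) : Nat → Nat → Int → Nat → Int × Nat
  | 0, _, val, e => (val, e)
  | fuel + 1, j, val, e =>
    if j < data.length then
      if thresh ≤ data.getD j 0 then
        pvRunB data thresh fuel (j + 1) (val + data.getD j 0) j
      else (val, e)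
    else (val, e)

def pvLoopB (data : List Int) (thresh : Int) : Nat → Nat → List ((Int × Int) × Int)
  | 0, _ => []
  | fuel + 1, i =>
    if i < data.length then
      if data.getD i 0 ≤ thresh then
        if (pvRunB data thresh data.length (i + 1) (data.getD i 0) i).2 ≠ i then
          (((i : Int), ((pvRunB data thresh data.length (i + 1) (data.getD i 0) i).2 : Int)),
            (pvRunB data thresh data.length (i + 1) (data.getD i 0) i).1) ::
          pvLoopB data thresh fuel ((pvRunB data thresh data.length (i + 1) (data.getD i 0) i).2 + 1)
        else pvLoopB data thresh fuel ((pvRunB data thresh data.length (i + 1) (data.getD i 0) i).2 + 1)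
      else pvLoopB data thresh fuel (i + 1)
    else []

theorem pv_getD_set_ne (l : List Bool) {i k : Nat} (h : i ≠ k) :
    (l.set i true).getD k false = l.getD k false := by
  simp [List.getD, List.getElem?_set_ne h]

theorem pv_getD_set_self (l : List Bool) {i : Nat} (h : i < l.length) :
    (l.set i true).getD i false = true := by
  simp [List.getD, List.getElem?_set_self h]

-- the run's end never moves backwards
theorem pvRunB_ge (data : List Int) (thresh : Int) :
    ∀ (n j : Nat) (val : Int) (e : Nat), e ≤ j →
      e ≤ (pvRunB data thresh n j val e).2 := by
  intro n
  induction n with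
  | zero => intro j val e he; simp only [pvRunB]; exact Nat.le_refl e
  | succ n ih =>
    intro j val e he
    simp only [pvRunB]
    by_cases hj : j < data.length
    · by_cases ht : thresh ≤ data.getD j 0
      · rw [if_pos hj, if_pos ht]
        have := ih (j + 1) (val + data.getD j 0) j (by omega)
        omega
      · rw [if_pos hj, if_neg ht]
    · rw [if_neg hj]

-- with out-of-range start the loops stop at once
theorem pvRunB_out (data : List Int) (thresh : Int) :
    ∀ (n j : Nat) (val : Int) (e : Nat), ¬ j < data.length →
      pvRunB data thresh n j val e = (val, e) := by
  intro n
  cases n with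
  | zero => intro j val e _; rfl
  | succ n => intro j val e hj; simp only [pvRunB]; rw [if_neg hj]

theorem pvOuterA_out (data : List Int) (thresh : Int) :
    ∀ (n i : Nat) (flag : List Bool) (blocks : List ((Int × Int) × Int)),
      ¬ i < data.length → pvOuterA data thresh n i flag blocks = blocks := by
  intro n
  cases n with
  | zero => intro i flag blocks _; rfl
  | succ n => intro i flag blocks hi; simp only [pvOuterA]; rw [if_neg hi]

theorem pvLoopB_out (data : List Int) (thresh : Int) :
    ∀ (n i : Nat), ¬ i < data.length → pvLoopB data thresh n i = [] := by
  intro n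
  cases n with
  | zero => intro i _; rfl
  | succ n => intro i hi; simp only [pvLoopB]; rw [if_neg hi]

-- the fuel amount is irrelevant once it covers the remaining indices
theorem pvOuterA_irrel (data : List Int) (thresh : Int) :
    ∀ (n m i : Nat) (flag : List Bool) (blocks : List ((Int × Int) × Int)),
      data.length - i ≤ n → data.length - i ≤ m →
      pvOuterA data thresh n i flag blocks = pvOuterA data thresh m i flag blocks := by
  intro n
  induction n with
  | zero =>
    intro m i flag blocks hn hm
    rw [pvOuterA_out data thresh 0 i flag blocks (by omega),
      pvOuterA_out data thresh m i flag blocks (by omega)]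
  | succ n ih =>
    intro m i flag blocks hn hm
    by_cases hi : i < data.length
    · obtain ⟨m', rfl⟩ : ∃ m', m = m' + 1 := ⟨m - 1, by omega⟩
      simp only [pvOuterA]
      rw [if_pos hi, if_pos hi]
      by_cases hc : data.getD i 0 ≤ thresh ∧ flag.getD i false = false
      · rw [if_pos hc, if_pos hc]
        exact ih m' (i + 1) _ _ (by omega) (by omega)
      · rw [if_neg hc, if_neg hc]
        exact ih m' (i + 1) _ _ (by omega) (by omega)
    · rw [pvOuterA_out data thresh _ i flag blocks hi,
        pvOuterA_out data thresh m i flag blocks hi]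

theorem pvLoopB_irrel (data : List Int) (thresh : Int) :
    ∀ (n m i : Nat),
      data.length - i ≤ n → data.length - i ≤ m →
      pvLoopB data thresh n i = pvLoopB data thresh m i := by
  intro n
  induction n with
  | zero =>
    intro m i hn hm
    rw [pvLoopB_out data thresh 0 i (by omega), pvLoopB_out data thresh m i (by omega)]
  | succ n ih =>
    intro m i hn hm
    by_cases hi : i < data.length
    · obtain ⟨m', rfl⟩ : ∃ m', m = m' + 1 := ⟨m - 1, by omega⟩
      simp only [pvLoopB]
      rw [if_pos hi, if_pos hi]
      by_cases ht : data.getD i 0 ≤ thresh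
      · rw [if_pos ht, if_pos ht]
        have hge : i ≤ (pvRunB data thresh data.length (i + 1) (data.getD i 0) i).2 :=
          pvRunB_ge data thresh data.length (i + 1) (data.getD i 0) i (by omega)
        by_cases hne : (pvRunB data thresh data.length (i + 1) (data.getD i 0) i).2 ≠ i
        · rw [if_pos hne, if_pos hne, ih m' _ (by omega) (by omega)]
        · rw [if_neg hne, if_neg hne]
          exact ih m' _ (by omega) (by omega)
      · rw [if_neg ht, if_neg ht]
        exact ih m' (i + 1) (by omega) (by omega)
    · rw [pvLoopB_out data thresh _ i hi, pvLoopB_out data thresh m i hi]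

theorem pvRunB_irrel (data : List Int) (thresh : Int) :
    ∀ (n m j : Nat) (val : Int) (e : Nat),
      data.length - j ≤ n → data.length - j ≤ m →
      pvRunB data thresh n j val e = pvRunB data thresh m j val e := by
  intro n
  induction n with
  | zero =>
    intro m j val e hn hm
    rw [pvRunB_out data thresh 0 j val e (by omega), pvRunB_out data thresh m j val e (by omega)]
  | succ n ih =>
    intro m j val e hn hm
    by_cases hj : j < data.length
    · obtain ⟨m', rfl⟩ : ∃ m', m = m' + 1 := ⟨m - 1, by omega⟩
      simp only [pvRunB]
      rw [if_pos hj, if_pos hj]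
      by_cases ht : thresh ≤ data.getD j 0
      · rw [if_pos ht, if_pos ht]
        exact ih m' (j + 1) _ j (by omega) (by omega)
      · rw [if_neg ht, if_neg ht]
    · rw [pvRunB_out data thresh _ j val e hj, pvRunB_out data thresh m j val e hj]

-- The inner loops agree: pvInnerA computes pvRunB's (val, end) and in addition sets
-- flag[k] := true exactly for the consumed indices j ≤ k ≤ end.
theorem pvInnerA_spec (data : List Int) (thresh : Int) :
    ∀ (n j : Nat) (val : Int) (e : Nat) (flag : List Bool),
      data.length - j ≤ n → e < j → flag.length = data.length →
      (pvInnerA data thresh n j val e flag).1 = (pvRunB data thresh n j val e).1 ∧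
      (pvInnerA data thresh n j val e flag).2.1 = (pvRunB data thresh n j val e).2 ∧
      (pvInnerA data thresh n j val e flag).2.2.length = data.length ∧
      (∀ k, k < j ∨ (pvRunB data thresh n j val e).2 < k →
        (pvInnerA data thresh n j val e flag).2.2.getD k false = flag.getD k false) ∧
      (∀ k, j ≤ k → k ≤ (pvRunB data thresh n j val e).2 →
        (pvInnerA data thresh n j val e flag).2.2.getD k false = true) := by
  intro n
  induction n with
  | zero =>
    intro j val e flag hn he hl
    exact ⟨rfl, rfl, hl, fun k _ => rfl, fun k h1 h2 => absurd (show k ≤ e from h2) (show ¬ k ≤ e by omega)⟩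
  | succ n ih =>
    intro j val e flag hn he hl
    simp only [pvInnerA, pvRunB]
    by_cases hj : j < data.length
    · by_cases ht : thresh ≤ data.getD j 0
      · rw [if_pos hj, if_pos hj, if_pos ht, if_pos ht]
        have hge : j ≤ (pvRunB data thresh n (j + 1) (val + data.getD j 0) j).2 :=
          pvRunB_ge data thresh n (j + 1) _ j (by omega)
        obtain ⟨h1, h2, h3, h4, h5⟩ :=
          ih (j + 1) (val + data.getD j 0) j (flag.set j true) (by omega) (by omega)
            (by rw [List.length_set]; exact hl)
        refine ⟨h1, h2, h3, ?_, ?_⟩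
        · intro k hk
          rcases hk with hk | hk
          · rw [h4 k (Or.inl (by omega))]
            exact pv_getD_set_ne flag (by omega)
          · rw [h4 k (Or.inr hk)]
            exact pv_getD_set_ne flag (by omega)
        · intro k hk1 hk2
          by_cases hkj : k = j
          · subst hkj
            rw [h4 k (Or.inl (by omega))]
            exact pv_getD_set_self flag (by omega)
          · exact h5 k (by omega) hk2
      · rw [if_pos hj, if_pos hj, if_neg ht, if_neg ht]
        exact ⟨rfl, rfl, hl, fun k _ => rfl, fun k h1 h2 => absurd (show k ≤ e from h2) (show ¬ k ≤ e by omega)⟩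
    · rw [if_neg hj, if_neg hj]
      exact ⟨rfl, rfl, hl, fun k _ => rfl, fun k h1 h2 => absurd (show k ≤ e from h2) (show ¬ k ≤ e by omega)⟩

-- Skipping a stretch of already-flagged indices only re-sets flags inside the stretch.
theorem pvOuterA_skip (data : List Int) (thresh : Int) :
    ∀ (m n p i : Nat) (flag : List Bool) (blocks : List ((Int × Int) × Int)),
      data.length - i ≤ n → data.length - (i + m) ≤ p →
      flag.length = data.length →
      (∀ k, i ≤ k → k < i + m → flag.getD k false = true) →
      ∃ flag', pvOuterA data thresh n i flag blocks = pvOuterA data thresh p (i + m) flag' blocks ∧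
        flag'.length = data.length ∧
        ∀ k, i + m ≤ k → flag'.getD k false = flag.getD k false := by
  intro m
  induction m with
  | zero =>
    intro n p i flag blocks hn hp hl _
    exact ⟨flag, pvOuterA_irrel data thresh n p i flag blocks hn (by omega), hl, fun k _ => rfl⟩
  | succ m ih =>
    intro n p i flag blocks hn hp hl htrue
    by_cases hi : i < data.length
    · obtain ⟨n', rfl⟩ : ∃ n', n = n' + 1 := ⟨n - 1, by omega⟩
      have hfi : flag.getD i false = true := htrue i (by omega) (by omega)
      simp only [pvOuterA]
      rw [if_pos hi,
        if_neg (show ¬ (data.getD i 0 ≤ thresh ∧ flag.getD i false = false) by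
          intro hc; rw [hfi] at hc; exact absurd hc.2 (by decide))]
      obtain ⟨flag', heq, hl', hout⟩ := ih n' p (i + 1) (flag.set i true) blocks
        (by omega) (by omega) (by rw [List.length_set]; exact hl)
        (by
          intro k hk1 hk2
          rw [pv_getD_set_ne flag (by omega)]
          exact htrue k (by omega) (by omega))
      refine ⟨flag', ?_, hl', ?_⟩
      · rw [heq]; congr 1; omega
      · intro k hk
        rw [hout k (by omega)]
        exact pv_getD_set_ne flag (by omega)
    · refine ⟨flag, ?_, hl, fun k _ => rfl⟩
      rw [pvOuterA_out data thresh n i flag blocks hi,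
        pvOuterA_out data thresh p (i + (m + 1)) flag blocks (by omega)]

-- Main invariant for A: with no flags set at or beyond i, A's outer loop from i produces pvLoopB from i.
theorem pv_main (data : List Int) (thresh : Int) :
    ∀ (n m i : Nat) (flag : List Bool) (blocks : List ((Int × Int) × Int)),
      data.length - i ≤ n → data.length - i ≤ m →
      flag.length = data.length →
      (∀ k, i ≤ k → flag.getD k false = false) →
      pvOuterA data thresh n i flag blocks = blocks ++ pvLoopB data thresh m i := by
  intro n
  induction n with
  | zero =>
    intro m i flag blocks hn hm hl hfalse
    rw [pvOuterA_out data thresh 0 i flag blocks (by omega),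
      pvLoopB_out data thresh m i (by omega), List.append_nil]
  | succ n ih =>
    intro m i flag blocks hn hm hl hfalse
    by_cases hi : i < data.length
    · obtain ⟨m', rfl⟩ : ∃ m', m = m' + 1 := ⟨m - 1, by omega⟩
      simp only [pvOuterA, pvLoopB]
      rw [if_pos hi, if_pos hi]
      by_cases ht : data.getD i 0 ≤ thresh
      · have hfi : flag.getD i false = false := hfalse i (by omega)
        rw [if_pos ⟨ht, hfi⟩, if_pos ht]
        obtain ⟨h1, h2, h3, h4, h5⟩ := pvInnerA_spec data thresh data.length
          (i + 1) (data.getD i 0) i flag (by omega) (by omega) hl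
        have hge : i ≤ (pvRunB data thresh data.length (i + 1) (data.getD i 0) i).2 :=
          pvRunB_ge data thresh data.length (i + 1) (data.getD i 0) i (by omega)
        rw [h1, h2]
        obtain ⟨flag', heq, hl', hout⟩ := pvOuterA_skip data thresh
          ((pvRunB data thresh data.length (i + 1) (data.getD i 0) i).2 - i) n n (i + 1)
          ((pvInnerA data thresh data.length (i + 1) (data.getD i 0) i flag).2.2.set i true) _
          (by omega) (by omega) (by rw [List.length_set]; exact h3)
          (by
            intro k hk1 hk2
            rw [pv_getD_set_ne _ (by omega)]
            exact h5 k hk1 (by omega))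
        rw [heq, show i + 1 + ((pvRunB data thresh data.length (i + 1) (data.getD i 0) i).2 - i)
            = (pvRunB data thresh data.length (i + 1) (data.getD i 0) i).2 + 1 by omega]
        rw [ih m' ((pvRunB data thresh data.length (i + 1) (data.getD i 0) i).2 + 1) flag' _
          (by omega) (by omega) hl'
          (by
            intro k hk
            rw [hout k (by omega), pv_getD_set_ne _ (by omega),
              h4 k (Or.inr (by omega))]
            exact hfalse k (by omega))]
        by_cases hne : i = (pvRunB data thresh data.length (i + 1) (data.getD i 0) i).2
        · rw [if_neg (by omega), if_neg (by omega)]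
        · rw [if_pos hne, if_pos (Ne.symm hne), List.append_assoc, List.singleton_append]
      · rw [if_neg (fun hc => ht hc.1), if_neg ht]
        exact ih m' (i + 1) (flag.set i true) blocks (by omega) (by omega)
          (by rw [List.length_set]; exact hl)
          (fun k hk => by
            rw [pv_getD_set_ne flag (by omega)]; exact hfalse k (by omega))
    · rw [pvOuterA_out data thresh _ i flag blocks hi,
        pvLoopB_out data thresh m i hi, List.append_nil]

theorem pv_flagInit (data : List Int) :
    ∀ k, (data.map (fun _ => false)).getD k false = false := by
  intro k
  rcases Nat.lt_or_ge k data.length with h | h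
  · simp [List.getD]
  · simp [List.getD]

-- facts about a dropped suffix
theorem pv_drop_cons (data : List Int) (j : Nat) (x : Int) (l : List Int)
    (h : data.drop j = x :: l) :
    data.getD j 0 = x ∧ data.drop (j + 1) = l ∧ j < data.length := by
  have hj : j < data.length := by
    by_contra hge
    rw [List.drop_eq_nil_of_le (by omega)] at h
    simp at h
  have hget : data[j]? = some x := by
    have h0 : (data.drop j)[0]? = data[j]? := by
      rw [List.getElem?_drop]
      simp
    rw [h] at h0
    simpa using h0.symm
  refine ⟨by simp [List.getD, hget], ?_, hj⟩
  have h1 : (data.drop j).tail = data.drop (j + 1) := List.tail_drop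
  rw [h] at h1
  simpa using h1.symm

-- Bridge: B's single-pass fold over enumerate equals the index-jumping loop pvLoopB.
-- First component: no open block at position j; second: an open block (b, j-1, v).
theorem pv_bridge (data : List Int) (thresh : Int) :
    ∀ (l : List Int) (j : Nat), data.drop j = l →
      (∀ blocks, pvFlushB ((PySem.List.enumerate l (j : Int)).foldl (pvStepB thresh) (blocks, none)) =
        blocks ++ pvLoopB data thresh data.length j)
      ∧ (∀ (blocks : List ((Int × Int) × Int)) (b v : Int) (e : Nat), j = e + 1 →
        pvFlushB ((PySem.List.enumerate l (j : Int)).foldl (pvStepB thresh) (blocks, some (b, (e : Int), v))) =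
          (if b ≠ ((pvRunB data thresh data.length j v e).2 : Int) then
            blocks ++ [((b, ((pvRunB data thresh data.length j v e).2 : Int)), (pvRunB data thresh data.length j v e).1)]
          else blocks)
          ++ pvLoopB data thresh data.length ((pvRunB data thresh data.length j v e).2 + 1)) := by
  intro l
  induction l with
  | nil =>
    intro j hdrop
    have hout : ¬ j < data.length := by
      by_contra h
      have hlen := congrArg List.length hdrop
      simp at hlen
      omega
    constructor
    · intro blocks
      rw [pvLoopB_out data thresh data.length j hout]
      simp [PySem.List.enumerate, pvFlushB]
    · intro blocks b v e hj
      rw [pvRunB_out data thresh data.length j v e hout]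
      rw [pvLoopB_out data thresh data.length (e + 1) (by omega)]
      simp [PySem.List.enumerate, pvFlushB]
  | cons x l ih =>
    intro j hdrop
    obtain ⟨hx, hdrop', hj⟩ := pv_drop_cons data j x l hdrop
    obtain ⟨f, hf⟩ : ∃ f, data.length = f + 1 := ⟨data.length - 1, by omega⟩
    obtain ⟨ihL, ihM⟩ := ih (j + 1) hdrop'
    have hcast : ((j : Int) + 1) = ((j + 1 : Nat) : Int) := by push_cast; ring
    constructor
    · -- no open block at j
      intro blocks
      rw [PySem.List.enumerate_cons, List.foldl_cons]
      by_cases ht : x ≤ thresh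
      · -- open a block (j, j, x); hand over to the open-block invariant at j+1
        have hstep : pvStepB thresh (blocks, none) ((j : Int), x)
            = (blocks, some ((j : Int), (j : Int), x)) := by
          simp [pvStepB, ht]
        rw [hstep, hcast, ihM blocks (j : Int) x j rfl]
        have hge : j ≤ (pvRunB data thresh data.length (j + 1) x j).2 :=
          pvRunB_ge data thresh data.length (j + 1) x j (by omega)
        have hloop : pvLoopB data thresh data.length j =
            if (pvRunB data thresh data.length (j + 1) x j).2 ≠ j then
              (((j : Int), ((pvRunB data thresh data.length (j + 1) x j).2 : Int)),
                (pvRunB data thresh data.length (j + 1) x j).1) ::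
              pvLoopB data thresh data.length ((pvRunB data thresh data.length (j + 1) x j).2 + 1)
            else pvLoopB data thresh data.length ((pvRunB data thresh data.length (j + 1) x j).2 + 1) := by
          conv_lhs => rw [hf]
          simp only [pvLoopB]
          rw [if_pos hj, hx, if_pos ht,
            pvLoopB_irrel data thresh f data.length
              ((pvRunB data thresh data.length (j + 1) x j).2 + 1) (by omega) (by omega)]
        rw [hloop]
        by_cases hne : (pvRunB data thresh data.length (j + 1) x j).2 = j
        · rw [if_neg (by simp [hne]), if_neg (by simpa using hne)]
        · rw [if_pos (show ((j : Int)) ≠ ((pvRunB data thresh data.length (j + 1) x j).2 : Int) by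
              exact_mod_cast fun h => hne (by exact_mod_cast h.symm)),
            if_pos hne, List.append_assoc, List.singleton_append]
      · -- skip
        have hstep : pvStepB thresh (blocks, none) ((j : Int), x) = (blocks, none) := by
          simp [pvStepB, ht]
        rw [hstep, hcast, ihL blocks]
        have hloop : pvLoopB data thresh data.length j = pvLoopB data thresh data.length (j + 1) := by
          conv_lhs => rw [hf]
          simp only [pvLoopB]
          rw [if_pos hj, hx, if_neg ht,
            pvLoopB_irrel data thresh f data.length (j + 1) (by omega) (by omega)]
        rw [hloop]
    · -- open block (b, e, v) with j = e + 1
      intro blocks b v e hje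
      rw [PySem.List.enumerate_cons, List.foldl_cons]
      by_cases ht : thresh ≤ x
      · -- extend the block
        have hstep : pvStepB thresh (blocks, some (b, (e : Int), v)) ((j : Int), x)
            = (blocks, some (b, (j : Int), v + x)) := by
          simp [pvStepB, ht]
        rw [hstep, hcast, ihM blocks b (v + x) j rfl]
        have hrun : pvRunB data thresh data.length j v e
            = pvRunB data thresh data.length (j + 1) (v + x) j := by
          conv_lhs => rw [hf]
          simp only [pvRunB]
          rw [if_pos hj, hx, if_pos ht]
          exact pvRunB_irrel data thresh f data.length (j + 1) (v + x) j (by omega) (by omega)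
        rw [hrun]
      · -- break: close the block, reopen at j
        have hstep : pvStepB thresh (blocks, some (b, (e : Int), v)) ((j : Int), x)
            = ((if b ≠ (e : Int) then blocks ++ [((b, (e : Int)), v)] else blocks),
               some ((j : Int), (j : Int), x)) := by
          simp [pvStepB, ht]
        rw [hstep, hcast,
          ihM (if b ≠ (e : Int) then blocks ++ [((b, (e : Int)), v)] else blocks) (j : Int) x j rfl]
        have hrun : pvRunB data thresh data.length j v e = (v, e) := by
          conv_lhs => rw [hf]
          simp only [pvRunB]
          rw [if_pos hj, hx, if_neg ht]
        rw [hrun, show e + 1 = j from hje.symm]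
        have hge : j ≤ (pvRunB data thresh data.length (j + 1) x j).2 :=
          pvRunB_ge data thresh data.length (j + 1) x j (by omega)
        have hloop : pvLoopB data thresh data.length j =
            if (pvRunB data thresh data.length (j + 1) x j).2 ≠ j then
              (((j : Int), ((pvRunB data thresh data.length (j + 1) x j).2 : Int)),
                (pvRunB data thresh data.length (j + 1) x j).1) ::
              pvLoopB data thresh data.length ((pvRunB data thresh data.length (j + 1) x j).2 + 1)
            else pvLoopB data thresh data.length ((pvRunB data thresh data.length (j + 1) x j).2 + 1) := by
          conv_lhs => rw [hf]
          simp only [pvLoopB]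
          rw [if_pos hj, hx, if_pos (by omega),
            pvLoopB_irrel data thresh f data.length
              ((pvRunB data thresh data.length (j + 1) x j).2 + 1) (by omega) (by omega)]
        rw [hloop]
        generalize (if b ≠ (e : Int) then blocks ++ [((b, (e : Int)), v)] else blocks) = blocks2
        by_cases hne : (pvRunB data thresh data.length (j + 1) x j).2 = j
        · rw [if_neg (by simp [hne]), if_neg (by simpa using hne)]
        · rw [if_pos (show ((j : Int)) ≠ ((pvRunB data thresh data.length (j + 1) x j).2 : Int) by
              exact_mod_cast fun h => hne (by exact_mod_cast h.symm)),
            if_pos hne, List.append_assoc, List.singleton_append]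

-- ===== VERDICT (by name: the statement is the Claim_ definition above) =====
theorem get_stran_spec : Claim_equal_get_stran := by
  intro data thresh _
  unfold Spec_get_stran get_stran get_stran_alt
  rw [pv_main data thresh data.length data.length 0 _ [] (by omega) (by omega) (by simp)
    (fun k _ => pv_flagInit data k), List.nil_append]
  have := (pv_bridge data thresh data 0 (by simp)).1 []
  simpa using this.symm
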